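-- pv_equiv track=rewrite | github.com/bshongwe/swe-study-repo | advent-of-code/day-10/day-10_pt_2.py | dfs_count_nines
-- ===== SOURCE A (Python) =====
-- def is_valid_move(height_map, x, y, current_height, visited):
--     """Checks if a move is valid based on height map constraints."""
--     rows, cols = len(height_map), len(height_map[0])
--     return (0 <= x < rows and 0 <= y < cols and
--             (x, y) not in visited and
--             height_map[x][y] == current_height + 1)
--
-- def dfs_count_nines(height_map, x, y, visited):
--     """Depth First Search to count reachable positions with value 9."""
--     stack = [(x, y, 0)]
--     reachable_nines = set()
--
--     while stack:
--         cx, cy, current_height = stack.pop()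
--
--         if (cx, cy) in visited:
--             continue
--         visited.add((cx, cy))
--
--         if height_map[cx][cy] == 9:
--             reachable_nines.add((cx, cy))
--
--         for dx, dy in [(-1, 0), (1, 0), (0, -1), (0, 1)]:
--             new_x, new_y = cx + dx, cy + dy
--             if is_valid_move(height_map, new_x, new_y, current_height, visited):
--                 new_height = height_map[new_x][new_y]
--                 stack.append((new_x, new_y, new_height))
--
--     return len(reachable_nines)
-- ===== SOURCE B (Python) =====
-- def is_valid_move(height_map, x, y, current_height, visited):
--     """Checks if a move is valid based on height map constraints."""
--     rows, cols = len(height_map), len(height_map[0])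
--     return (0 <= x < rows and 0 <= y < cols and
--             (x, y) not in visited and
--             height_map[x][y] == current_height + 1)
--
-- def dfs_count_nines(height_map, x, y, visited):
--     """Recursive depth-first search counting reachable value-9 cells.
--
--     Mutates `visited` exactly like the stack version (return value is the point)."""
--     reachable_nines = set()
--
--     def dfs(cx, cy, current_height):
--         if (cx, cy) in visited:
--             return
--         visited.add((cx, cy))
--         if height_map[cx][cy] == 9:
--             reachable_nines.add((cx, cy))
--         for dx, dy in ((0, 1), (0, -1), (1, 0), (-1, 0)):
--             nx, ny = cx + dx, cy + dy
--             if is_valid_move(height_map, nx, ny, current_height, visited):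
--                 dfs(nx, ny, height_map[nx][ny])
--
--     dfs(x, y, 0)
--     return len(reachable_nines)
-- ===== Notes on version B (the rewrite author's own statement) =====
-- stated objective: alternative
-- what changed: Replaces the explicit stack/worklist loop by a recursive DFS helper that re-checks validity at call time and recurses into neighbours in reverse push order, so the traversal is expressed as structural recursion instead of stack bookkeeping.
-- outside the precondition, e.g. on dfs_count_nines([[0], [5, 7]], 0, 0, set()): A returns 0, B returns 0
import Mathlib
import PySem

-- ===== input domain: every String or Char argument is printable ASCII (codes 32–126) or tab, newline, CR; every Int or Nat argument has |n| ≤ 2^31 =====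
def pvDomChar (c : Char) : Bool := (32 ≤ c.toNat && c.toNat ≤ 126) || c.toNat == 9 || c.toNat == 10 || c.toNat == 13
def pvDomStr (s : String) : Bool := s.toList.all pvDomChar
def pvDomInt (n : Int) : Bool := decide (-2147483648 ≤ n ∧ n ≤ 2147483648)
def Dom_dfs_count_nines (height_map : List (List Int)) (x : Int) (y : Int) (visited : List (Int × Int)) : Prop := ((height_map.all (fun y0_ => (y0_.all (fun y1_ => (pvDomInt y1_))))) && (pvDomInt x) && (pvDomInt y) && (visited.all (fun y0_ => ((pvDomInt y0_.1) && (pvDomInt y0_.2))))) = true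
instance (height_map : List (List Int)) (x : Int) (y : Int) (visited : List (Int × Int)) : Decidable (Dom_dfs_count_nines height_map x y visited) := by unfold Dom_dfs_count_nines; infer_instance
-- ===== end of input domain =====

-- B replaces A's explicit stack/worklist loop by a recursive DFS helper (recursing into
-- neighbours in reverse push order); same asymptotic cost ("alternative").  Both Pythons
-- mutate `visited` identically; the theorems below are about the RETURN value.

-- ===== PORT A =====

-- height_map[a][b] as an Option (none = IndexError; Python negative indices handled by pyGet?)
def pvGet2 (hm : List (List Int)) (a b : Int) : Option Int :=
  match PySem.List.pyGet? hm a with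
  | some row => PySem.List.pyGet? row b
  | none => none

-- shared helper `is_valid_move` (identical in both Python sources).
-- `len(height_map[0])` raises on an empty grid; the `none => 0` branch is unreached inside Pre_.
def is_valid_move (hm : List (List Int)) (x y current_height : Int) (visited : List (Int × Int)) : Bool :=
  let rows : Int := hm.length
  let cols : Int := match PySem.List.pyGet? hm 0 with | some r => (r.length : Int) | none => 0
  decide (0 ≤ x) && decide (x < rows) && decide (0 ≤ y) && decide (y < cols) &&
    !(visited.contains (x, y)) && (pvGet2 hm x y == some (current_height + 1))

-- all Python-indexable (a, b) positions of the grid (negative indices included); its length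
-- only sizes the fuel of the two ports, which provably never runs out (see the lemmas below)
def gridL (hm : List (List Int)) : List (Int × Int) :=
  (List.range (2 * hm.length)).flatMap (fun (i : Nat) =>
    let a : Int := (i : Int) - hm.length
    match PySem.List.pyGet? hm a with
    | some row => (List.range (2 * row.length)).map (fun (j : Nat) => (a, (j : Int) - row.length))
    | none => [])

-- A's while-loop; the head of the list is the top of Python's stack (append/pop at the end).
-- In the `pvGet2 … = none` case Python raises IndexError (excluded by Pre_): the port stops there.
def dfs_loop (hm : List (List Int)) (fuel : Nat) (stack : List (Int × Int × Int))
    (visited nines : List (Int × Int)) : List (Int × Int) × List (Int × Int) :=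
  match fuel, stack with
  | 0, _ => (visited, nines)
  | _ + 1, [] => (visited, nines)
  | fuel + 1, (cx, cy, ch) :: rest =>
    if visited.contains (cx, cy) then dfs_loop hm fuel rest visited nines
    else
      let visited' := PySem.Set.add visited (cx, cy)
      match pvGet2 hm cx cy with
      | none => (visited', nines)
      | some h =>
        let nines' := if h == 9 then PySem.Set.add nines (cx, cy) else nines
        let stack' := [((-1 : Int), (0 : Int)), (1, 0), (0, -1), (0, 1)].foldl
          (fun acc d =>
            if is_valid_move hm (cx + d.1) (cy + d.2) ch visited' then
              (cx + d.1, cy + d.2, (pvGet2 hm (cx + d.1) (cy + d.2)).getD 0) :: acc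
            else acc) rest
        dfs_loop hm fuel stack' visited' nines'

def dfs_count_nines (height_map : List (List Int)) (x : Int) (y : Int) (visited : List (Int × Int)) : Int :=
  ((dfs_loop height_map (4 * (gridL height_map).length + 1) [(x, y, 0)] visited []).2.length : Int)

-- ===== PORT B =====

-- B's inner `def dfs(cx, cy, current_height)` (dfs_rec) and its for-loop over the four
-- neighbour directions (dfs_rec_go), threading the mutated `visited`/`reachable_nines`.
mutual
def dfs_rec (hm : List (List Int)) (fuel : Nat) (cx cy ch : Int)
    (visited nines : List (Int × Int)) : List (Int × Int) × List (Int × Int) :=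
  match fuel with
  | 0 => (visited, nines)
  | fuel + 1 =>
    if visited.contains (cx, cy) then (visited, nines)
    else
      let visited' := PySem.Set.add visited (cx, cy)
      match pvGet2 hm cx cy with
      | none => (visited', nines)
      | some h =>
        let nines' := if h == 9 then PySem.Set.add nines (cx, cy) else nines
        dfs_rec_go hm fuel [((0 : Int), (1 : Int)), (0, -1), (1, 0), (-1, 0)] cx cy ch visited' nines'

def dfs_rec_go (hm : List (List Int)) (fuel : Nat) (dirs : List (Int × Int)) (cx cy ch : Int)
    (visited nines : List (Int × Int)) : List (Int × Int) × List (Int × Int) :=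
  match fuel, dirs with
  | 0, _ => (visited, nines)
  | _ + 1, [] => (visited, nines)
  | fuel + 1, d :: ds =>
    if is_valid_move hm (cx + d.1) (cy + d.2) ch visited then
      let s := dfs_rec hm fuel (cx + d.1) (cy + d.2)
        ((pvGet2 hm (cx + d.1) (cy + d.2)).getD 0) visited nines
      dfs_rec_go hm fuel ds cx cy ch s.1 s.2
    else dfs_rec_go hm fuel ds cx cy ch visited nines
end

def dfs_count_nines_alt (height_map : List (List Int)) (x : Int) (y : Int) (visited : List (Int × Int)) : Int :=
  ((dfs_rec height_map (5 * (gridL height_map).length + 5) x y 0 visited []).2.length : Int)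

-- ===== PRECONDITION & SPEC =====

-- Pre_ excludes the inputs on which Python A raises IndexError: a start cell outside the grid
-- (Python index range) while not already in `visited`, and ragged grids (rows of differing
-- length; A indexes rows using len(height_map[0]) and raises on a reachable short row).
-- Rectangularity also excludes some ragged grids on which A happens to return (see claim cites).
def Pre_dfs_count_nines (height_map : List (List Int)) (x : Int) (y : Int) (visited : List (Int × Int)) : Prop :=
  (x, y) ∈ visited ∨
    ((∀ row ∈ height_map, row.length = (height_map.headD []).length) ∧
      PySem.Raise.InRange height_map.length x ∧
      PySem.Raise.InRange (height_map.headD []).length y)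

instance (height_map : List (List Int)) (x : Int) (y : Int) (visited : List (Int × Int)) : Decidable (Pre_dfs_count_nines height_map x y visited) := by
  unfold Pre_dfs_count_nines; infer_instance

def pvWitness_dfs_count_nines : List (List Int) × Int × Int × (List (Int × Int)) :=
  ([[0, 1], [9, 2]], 0, 0, [])

def Spec_dfs_count_nines (height_map : List (List Int)) (x : Int) (y : Int) (visited : List (Int × Int)) (out : Int) : Prop := out = dfs_count_nines_alt height_map x y visited
instance (height_map : List (List Int)) (x : Int) (y : Int) (visited : List (Int × Int)) (out : Int) : Decidable (Spec_dfs_count_nines height_map x y visited out) := by unfold Spec_dfs_count_nines; infer_instance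

-- ===== CLAIM (what is proved, stated in full; the proofs are below) =====
def Claim_equal_dfs_count_nines : Prop := ∀ (height_map : List (List Int)) (x : Int) (y : Int) (visited : List (Int × Int)), Dom_dfs_count_nines height_map x y visited → Pre_dfs_count_nines height_map x y visited → Spec_dfs_count_nines height_map x y visited (dfs_count_nines height_map x y visited)

-- ===== LEMMAS AND PROOFS =====

-- number of grid positions not yet visited: the decreasing part of both fuel measures
def pvCount (hm : List (List Int)) (v : List (Int × Int)) : Nat :=
  ((gridL hm).filter (fun p => !(v.contains p))).length

theorem pvCount_le (hm : List (List Int)) (v : List (Int × Int)) :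
    pvCount hm v ≤ (gridL hm).length := by
  exact List.length_filter_le _ _

theorem inRange_of_pyGet2 (hm : List (List Int)) (a b h : Int) (hg : pvGet2 hm a b = some h) :
    ∃ row, PySem.List.pyGet? hm a = some row ∧ PySem.List.pyGet? row b = some h := by
  unfold pvGet2 at hg
  cases e : PySem.List.pyGet? hm a with
  | none => rw [e] at hg; cases hg
  | some row => rw [e] at hg; exact ⟨row, rfl, hg⟩

theorem inRange_of_some {α : Type} (xs : List α) (i : Int) (x : α)
    (h : PySem.List.pyGet? xs i = some x) : -(xs.length : Int) ≤ i ∧ i < xs.length := by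
  have h2 : ¬ (PySem.List.pyGet? xs i = none) := by simp [h]
  rw [PySem.List.pyGet?_eq_none_iff] at h2
  have := not_not.mp h2
  simpa [PySem.Raise.InRange] using this

theorem mem_gridL (hm : List (List Int)) (a b h : Int) (hg : pvGet2 hm a b = some h) :
    (a, b) ∈ gridL hm := by
  obtain ⟨row, e, e2⟩ := inRange_of_pyGet2 hm a b h hg
  obtain ⟨ha1, ha2⟩ := inRange_of_some hm a row e
  obtain ⟨hb1, hb2⟩ := inRange_of_some row b h e2
  unfold gridL
  apply List.mem_flatMap.mpr
  refine ⟨(a + hm.length).toNat, ?_, ?_⟩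
  · exact List.mem_range.mpr (by omega)
  have key : (((a + hm.length).toNat : Nat) : Int) - (hm.length : Int) = a := by omega
  simp only [key, e, List.mem_map]
  refine ⟨(b + row.length).toNat, ?_, ?_⟩
  · exact List.mem_range.mpr (by omega)
  have key2 : (((b + row.length).toNat : Nat) : Int) - (row.length : Int) = b := by omega
  rw [key2]

theorem filt_len_mono {α : Type} (l : List α) (p q : α → Bool) (h : ∀ x, p x = true → q x = true) :
    (l.filter p).length ≤ (l.filter q).length := by
  induction l with
  | nil => simp
  | cons a l ih =>
    by_cases hp : p a = true
    · simp [hp, h a hp]; omega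
    · simp only [List.filter_cons]
      rw [if_neg (by simp [hp])]
      cases hq : q a <;> simp <;> omega

theorem contains_false {α : Type} [BEq α] [LawfulBEq α] (l : List α) (a : α) :
    l.contains a = false ↔ ¬ (a ∈ l) := by
  rw [← List.contains_iff_mem]; cases l.contains a <;> simp

theorem pvCount_mono (hm : List (List Int)) (v v' : List (Int × Int))
    (h : ∀ q, q ∈ v → q ∈ v') : pvCount hm v' ≤ pvCount hm v := by
  apply filt_len_mono
  intro p hp
  simp only [Bool.not_eq_true'] at hp ⊢
  rw [contains_false] at hp ⊢
  exact fun hm' => hp (h p hm')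

theorem filt_lt {α : Type} (l : List α) (P Q : α → Bool) (himp : ∀ x, P x = true → Q x = true)
    (p : α) (hp : p ∈ l) (hPp : P p = false) (hQp : Q p = true) :
    (l.filter P).length < (l.filter Q).length := by
  induction l with
  | nil => cases hp
  | cons a l ih =>
    rcases List.mem_cons.mp hp with rfl | hmem
    · rw [List.filter_cons, List.filter_cons, if_neg (by simp [hPp]), if_pos (by simp [hQp])]
      have := filt_len_mono l P Q himp
      simp only [List.length_cons]; omega
    · have hrec := ih hmem
      rw [List.filter_cons, List.filter_cons]
      cases hPa : P a
      · rw [if_neg (by simp [])]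
        cases hQa : Q a
        · rw [if_neg (by simp [])]; exact hrec
        · rw [if_pos (by simp [])]; simp only [List.length_cons]; omega
      · rw [if_pos (by simp []), if_pos (by simp [himp a hPa])]
        simp only [List.length_cons]; omega

theorem pvCount_lt (hm : List (List Int)) (v : List (Int × Int)) (p : Int × Int)
    (hp : p ∈ gridL hm) (hv : v.contains p = false) :
    pvCount hm (PySem.Set.add v p) < pvCount hm v := by
  unfold pvCount
  have hnm : p ∉ v := (contains_false v p).mp hv
  have hadd : PySem.Set.add v p = v ++ [p] := by simp [PySem.Set.add, hnm]
  rw [hadd]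
  refine filt_lt _ _ _ ?_ p hp ?_ ?_
  · intro x hx
    simp only [Bool.not_eq_true'] at hx ⊢
    rw [contains_false] at hx ⊢
    simp only [List.mem_append] at hx
    exact fun hmx => hx (Or.inl hmx)
  · simp
  · simp [hnm]

-- visited only grows
theorem mem_add_of_mem (v : List (Int × Int)) (p q : Int × Int) (h : q ∈ v) :
    q ∈ PySem.Set.add v p := by
  simp [PySem.Set.mem_add]; tauto

theorem rec_mono (hm : List (List Int)) (fuel : Nat) :
    (∀ cx cy ch v n q, q ∈ v → q ∈ (dfs_rec hm fuel cx cy ch v n).1) ∧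
    (∀ ds cx cy ch v n q, q ∈ v → q ∈ (dfs_rec_go hm fuel ds cx cy ch v n).1) := by
  induction fuel with
  | zero =>
    constructor
    · intro cx cy ch v n q hq; simpa [dfs_rec] using hq
    · intro ds cx cy ch v n q hq; simpa [dfs_rec_go] using hq
  | succ f ih =>
    obtain ⟨ihm, ihg⟩ := ih
    constructor
    · intro cx cy ch v n q hq
      rw [dfs_rec]
      cases hc : v.contains (cx, cy)
      · simp only [Bool.false_eq_true, if_false]
        cases e : pvGet2 hm cx cy
        · simpa using mem_add_of_mem v (cx, cy) q hq
        · simp only []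
          exact ihg _ _ _ _ _ _ q (mem_add_of_mem v (cx, cy) q hq)
      · simpa [hc] using hq
    · intro ds cx cy ch v n q hq
      cases ds with
      | nil => simpa [dfs_rec_go] using hq
      | cons d ds =>
        rw [show dfs_rec_go hm (f + 1) (d :: ds) cx cy ch v n =
            (if is_valid_move hm (cx + d.1) (cy + d.2) ch v then
              let s := dfs_rec hm f (cx + d.1) (cy + d.2)
                ((pvGet2 hm (cx + d.1) (cy + d.2)).getD 0) v n
              dfs_rec_go hm f ds cx cy ch s.1 s.2
            else dfs_rec_go hm f ds cx cy ch v n) from rfl]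
        cases hval : is_valid_move hm (cx + d.1) (cy + d.2) ch v
        · simp only [Bool.false_eq_true, if_false]
          exact ihg _ _ _ _ _ _ q hq
        · simp only [if_true]
          exact ihg _ _ _ _ _ _ q (ihm _ _ _ _ _ q hq)

-- definitional unfoldings (one step) of the two B functions and of A's loop
theorem rec_succ (hm : List (List Int)) (f : Nat) (cx cy ch : Int) (v n : List (Int × Int)) :
    dfs_rec hm (f + 1) cx cy ch v n =
      (if v.contains (cx, cy) then (v, n)
       else
        let visited' := PySem.Set.add v (cx, cy)
        match pvGet2 hm cx cy with
        | none => (visited', n)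
        | some h =>
          let nines' := if h == 9 then PySem.Set.add n (cx, cy) else n
          dfs_rec_go hm f [((0 : Int), (1 : Int)), (0, -1), (1, 0), (-1, 0)] cx cy ch visited' nines') := rfl

theorem go_nil (hm : List (List Int)) (f : Nat) (cx cy ch : Int) (v n : List (Int × Int)) :
    dfs_rec_go hm (f + 1) [] cx cy ch v n = (v, n) := rfl

theorem go_cons (hm : List (List Int)) (f : Nat) (d : Int × Int) (ds : List (Int × Int))
    (cx cy ch : Int) (v n : List (Int × Int)) :
    dfs_rec_go hm (f + 1) (d :: ds) cx cy ch v n =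
      (if is_valid_move hm (cx + d.1) (cy + d.2) ch v then
        let s := dfs_rec hm f (cx + d.1) (cy + d.2)
          ((pvGet2 hm (cx + d.1) (cy + d.2)).getD 0) v n
        dfs_rec_go hm f ds cx cy ch s.1 s.2
      else dfs_rec_go hm f ds cx cy ch v n) := rfl

theorem loop_cons (hm : List (List Int)) (f : Nat) (cx cy ch : Int)
    (rest : List (Int × Int × Int)) (v n : List (Int × Int)) :
    dfs_loop hm (f + 1) ((cx, cy, ch) :: rest) v n =
      (if v.contains (cx, cy) then dfs_loop hm f rest v n
       else
        let visited' := PySem.Set.add v (cx, cy)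
        match pvGet2 hm cx cy with
        | none => (visited', n)
        | some h =>
          let nines' := if h == 9 then PySem.Set.add n (cx, cy) else n
          let stack' := [((-1 : Int), (0 : Int)), (1, 0), (0, -1), (0, 1)].foldl
            (fun acc d =>
              if is_valid_move hm (cx + d.1) (cy + d.2) ch visited' then
                (cx + d.1, cy + d.2, (pvGet2 hm (cx + d.1) (cy + d.2)).getD 0) :: acc
              else acc) rest
          dfs_loop hm f stack' visited' nines') := rfl

-- fuel irrelevance above the measure, for B
theorem rec_stable (hm : List (List Int)) (f : Nat) :
    (∀ g cx cy ch v n, 5 * pvCount hm v + 1 ≤ f → 5 * pvCount hm v + 1 ≤ g →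
      dfs_rec hm f cx cy ch v n = dfs_rec hm g cx cy ch v n) ∧
    (∀ g ds cx cy ch v n, 5 * pvCount hm v + ds.length + 1 ≤ f → 5 * pvCount hm v + ds.length + 1 ≤ g →
      dfs_rec_go hm f ds cx cy ch v n = dfs_rec_go hm g ds cx cy ch v n) := by
  induction f using Nat.strong_induction_on with
  | _ f ih =>
    constructor
    · intro g cx cy ch v n hf hg
      obtain ⟨f', rfl⟩ : ∃ f', f = f' + 1 := ⟨f - 1, by omega⟩
      obtain ⟨g', rfl⟩ : ∃ g', g = g' + 1 := ⟨g - 1, by omega⟩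
      rw [rec_succ, rec_succ]
      cases hc : v.contains (cx, cy)
      · simp only [Bool.false_eq_true, if_false]
        cases e : pvGet2 hm cx cy with
        | none => simp only []
        | some h =>
          simp only []
          have hlt : pvCount hm (PySem.Set.add v (cx, cy)) < pvCount hm v :=
            pvCount_lt hm v _ (mem_gridL hm cx cy h e) hc
          exact (ih f' (by omega)).2 g' _ cx cy ch _ _ (by simp; omega) (by simp; omega)
      · simp only [if_true]
    · intro g ds cx cy ch v n hf hg
      obtain ⟨f', rfl⟩ : ∃ f', f = f' + 1 := ⟨f - 1, by omega⟩
      obtain ⟨g', rfl⟩ : ∃ g', g = g' + 1 := ⟨g - 1, by omega⟩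
      cases ds with
      | nil => rw [go_nil, go_nil]
      | cons d ds =>
        rw [go_cons, go_cons]
        simp only [List.length_cons] at hf hg
        cases hval : is_valid_move hm (cx + d.1) (cy + d.2) ch v
        · simp only [Bool.false_eq_true, if_false]
          exact (ih f' (by omega)).2 g' ds cx cy ch v n (by omega) (by omega)
        · simp only [if_true]
          have hrec : dfs_rec hm f' (cx + d.1) (cy + d.2)
              ((pvGet2 hm (cx + d.1) (cy + d.2)).getD 0) v n =
              dfs_rec hm g' (cx + d.1) (cy + d.2)
              ((pvGet2 hm (cx + d.1) (cy + d.2)).getD 0) v n :=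
            (ih f' (by omega)).1 g' _ _ _ v n (by omega) (by omega)
          rw [← hrec]
          have hsub := (rec_mono hm f').1 (cx + d.1) (cy + d.2)
            ((pvGet2 hm (cx + d.1) (cy + d.2)).getD 0) v n
          have hcnt : pvCount hm (dfs_rec hm f' (cx + d.1) (cy + d.2)
              ((pvGet2 hm (cx + d.1) (cy + d.2)).getD 0) v n).1 ≤ pvCount hm v :=
            pvCount_mono hm v _ (fun q hq => hsub q hq)
          exact (ih f' (by omega)).2 g' ds cx cy ch _ _ (by omega) (by omega)

-- canonical B call with always-sufficient fuel
def runB (hm : List (List Int)) (t : Int × Int × Int) (s : List (Int × Int) × List (Int × Int)) :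
    List (Int × Int) × List (Int × Int) :=
  dfs_rec hm (5 * (gridL hm).length + 5) t.1 t.2.1 t.2.2 s.1 s.2

def goList (hm : List (List Int)) (st : List (Int × Int × Int))
    (s : List (Int × Int) × List (Int × Int)) : List (Int × Int) × List (Int × Int) :=
  st.foldl (fun s t => runB hm t s) s

-- the state-independent part of is_valid_move
def svalid (hm : List (List Int)) (x y ch : Int) : Bool :=
  let rows : Int := hm.length
  let cols : Int := match PySem.List.pyGet? hm 0 with | some r => (r.length : Int) | none => 0
  decide (0 ≤ x) && decide (x < rows) && decide (0 ≤ y) && decide (y < cols) &&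
    (pvGet2 hm x y == some (ch + 1))

theorem valid_iff (hm : List (List Int)) (x y ch : Int) (v : List (Int × Int)) :
    is_valid_move hm x y ch v = true ↔ (svalid hm x y ch = true ∧ v.contains (x, y) = false) := by
  unfold is_valid_move svalid
  simp only [Bool.and_eq_true, Bool.not_eq_true']
  tauto

theorem valid_mono (hm : List (List Int)) (x y ch : Int) (v₁ v : List (Int × Int))
    (hsub : ∀ q, q ∈ v₁ → q ∈ v) (h : is_valid_move hm x y ch v = true) :
    is_valid_move hm x y ch v₁ = true := by
  obtain ⟨hs, hc⟩ := (valid_iff hm x y ch v).mp h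
  refine (valid_iff hm x y ch v₁).mpr ⟨hs, ?_⟩
  rw [contains_false] at hc ⊢
  exact fun hq => hc (hsub _ hq)

theorem svalid_get (hm : List (List Int)) (x y ch : Int) (h : svalid hm x y ch = true) :
    pvGet2 hm x y = some (ch + 1) := by
  unfold svalid at h
  simp only [Bool.and_eq_true, beq_iff_eq] at h
  exact h.2

theorem goList_nil (hm : List (List Int)) (s : List (Int × Int) × List (Int × Int)) :
    goList hm [] s = s := rfl

theorem goList_cons (hm : List (List Int)) (t : Int × Int × Int) (l : List (Int × Int × Int))
    (s : List (Int × Int) × List (Int × Int)) :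
    goList hm (t :: l) s = goList hm l (runB hm t s) := rfl

theorem goList_append (hm : List (List Int)) (l1 l2 : List (Int × Int × Int))
    (s : List (Int × Int) × List (Int × Int)) :
    goList hm (l1 ++ l2) s = goList hm l2 (goList hm l1 s) := by
  simp [goList, List.foldl_append]

theorem runB_visited (hm : List (List Int)) (t : Int × Int × Int)
    (s : List (Int × Int) × List (Int × Int)) (h : (t.1, t.2.1) ∈ s.1) :
    runB hm t s = s := by
  unfold runB
  rw [show 5 * (gridL hm).length + 5 = (5 * (gridL hm).length + 4) + 1 from rfl, rec_succ]
  rw [if_pos (by simpa [List.contains_iff_mem] using h)]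

theorem go_spec (hm : List (List Int)) (ds : List (Int × Int)) :
    ∀ f cx cy ch (v₁ v n : List (Int × Int)),
      5 * pvCount hm v + ds.length + 1 ≤ f → (∀ q, q ∈ v₁ → q ∈ v) →
      dfs_rec_go hm f ds cx cy ch v n =
        goList hm (ds.filterMap (fun d =>
          if is_valid_move hm (cx + d.1) (cy + d.2) ch v₁ then
            some (cx + d.1, cy + d.2, (pvGet2 hm (cx + d.1) (cy + d.2)).getD 0)
          else none)) (v, n) := by
  induction ds with
  | nil =>
    intro f cx cy ch v₁ v n hf hsub
    obtain ⟨f', rfl⟩ : ∃ f', f = f' + 1 := ⟨f - 1, by omega⟩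
    rw [go_nil, List.filterMap_nil, goList_nil]
  | cons d ds ih =>
    intro f cx cy ch v₁ v n hf hsub
    obtain ⟨f', rfl⟩ : ∃ f', f = f' + 1 := ⟨f - 1, by omega⟩
    rw [go_cons, List.filterMap_cons]
    simp only [List.length_cons] at hf
    cases hv1 : is_valid_move hm (cx + d.1) (cy + d.2) ch v₁
    · have hv0 : is_valid_move hm (cx + d.1) (cy + d.2) ch v = false := by
        cases hcur : is_valid_move hm (cx + d.1) (cy + d.2) ch v
        · rfl
        · rw [valid_mono hm _ _ _ v₁ v hsub hcur] at hv1; cases hv1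
      simp only [hv0, Bool.false_eq_true, if_false]
      exact ih f' cx cy ch v₁ v n (by omega) hsub
    · simp only [if_true]
      rw [goList_cons]
      cases hv : is_valid_move hm (cx + d.1) (cy + d.2) ch v
      · -- the precomputed neighbour is visited by now: B's recursive call is a no-op
        have hcell : (cx + d.1, cy + d.2) ∈ v := by
          obtain ⟨hs, _⟩ := (valid_iff hm _ _ ch v₁).mp hv1
          by_contra hnm
          have : is_valid_move hm (cx + d.1) (cy + d.2) ch v = true :=
            (valid_iff hm _ _ ch v).mpr ⟨hs, (contains_false v _).mpr hnm⟩
          rw [this] at hv; cases hv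
        rw [runB_visited hm _ _ hcell]
        simp only [Bool.false_eq_true, if_false]
        exact ih f' cx cy ch v₁ v n (by omega) hsub
      · simp only [if_true]
        have hsame : dfs_rec hm (5 * (gridL hm).length + 5) (cx + d.1) (cy + d.2)
            ((pvGet2 hm (cx + d.1) (cy + d.2)).getD 0) v n =
            dfs_rec hm f' (cx + d.1) (cy + d.2)
            ((pvGet2 hm (cx + d.1) (cy + d.2)).getD 0) v n := by
          have hle := pvCount_le hm v
          exact (rec_stable hm (5 * (gridL hm).length + 5)).1 f' _ _ _ v n (by omega) (by omega)
        have hrb : runB hm (cx + d.1, cy + d.2, (pvGet2 hm (cx + d.1) (cy + d.2)).getD 0) (v, n) =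
            dfs_rec hm f' (cx + d.1) (cy + d.2)
            ((pvGet2 hm (cx + d.1) (cy + d.2)).getD 0) v n := by
          unfold runB; exact hsame
        rw [hrb]
        have hsub2 := (rec_mono hm f').1 (cx + d.1) (cy + d.2)
          ((pvGet2 hm (cx + d.1) (cy + d.2)).getD 0) v n
        have hcnt : pvCount hm (dfs_rec hm f' (cx + d.1) (cy + d.2)
            ((pvGet2 hm (cx + d.1) (cy + d.2)).getD 0) v n).1 ≤ pvCount hm v :=
          pvCount_mono hm v _ (fun q hq => hsub2 q hq)
        rw [show (dfs_rec hm f' (cx + d.1) (cy + d.2)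
            ((pvGet2 hm (cx + d.1) (cy + d.2)).getD 0) v n) =
            ((dfs_rec hm f' (cx + d.1) (cy + d.2)
            ((pvGet2 hm (cx + d.1) (cy + d.2)).getD 0) v n).1,
             (dfs_rec hm f' (cx + d.1) (cy + d.2)
            ((pvGet2 hm (cx + d.1) (cy + d.2)).getD 0) v n).2) from rfl]
        exact ih f' cx cy ch v₁
          ((dfs_rec hm f' (cx + d.1) (cy + d.2) ((pvGet2 hm (cx + d.1) (cy + d.2)).getD 0) v n).1)
          ((dfs_rec hm f' (cx + d.1) (cy + d.2) ((pvGet2 hm (cx + d.1) (cy + d.2)).getD 0) v n).2)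
          (by omega) (fun q hq => hsub2 q (hsub q hq))

theorem foldl_consif {α β : Type} (L : List α) (C : α → Bool) (X : α → β) :
    ∀ (rest : List β), L.foldl (fun acc d => if C d then X d :: acc else acc) rest
      = (L.filterMap (fun d => if C d then some (X d) else none)).reverse ++ rest := by
  induction L with
  | nil => intro rest; simp
  | cons a L ihL =>
    intro rest
    simp only [List.foldl_cons, List.filterMap_cons]
    cases hCa : C a
    · simp only [Bool.false_eq_true, if_false]
      exact ihL rest
    · simp only [if_true]
      rw [ihL (X a :: rest)]
      simp [List.reverse_cons, List.append_assoc]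

theorem loop_spec (hm : List (List Int)) (f : Nat) :
    ∀ st (v n : List (Int × Int)), 4 * pvCount hm v + st.length ≤ f →
      (∀ p ∈ st, (p.1, p.2.1) ∈ v ∨ (pvGet2 hm p.1 p.2.1).isSome = true) →
      dfs_loop hm f st v n = goList hm st (v, n) := by
  induction f using Nat.strong_induction_on with
  | _ f ih =>
    intro st v n hf hH
    cases st with
    | nil => cases f <;> rfl
    | cons t rest =>
      obtain ⟨cx, cy, ch⟩ := t
      obtain ⟨f', rfl⟩ : ∃ f', f = f' + 1 := ⟨f - 1, by simp at hf; omega⟩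
      rw [loop_cons, goList_cons]
      simp only [List.length_cons] at hf
      cases hc : v.contains (cx, cy)
      · simp only [Bool.false_eq_true, if_false]
        cases e : pvGet2 hm cx cy with
        | none =>
          exfalso
          rcases hH _ List.mem_cons_self with hmem | hsome
          · exact (contains_false v _).mp hc hmem
          · rw [e] at hsome; simp at hsome
        | some h =>
          simp only []
          rw [foldl_consif]
          have hlt : pvCount hm (PySem.Set.add v (cx, cy)) < pvCount hm v :=
            pvCount_lt hm v _ (mem_gridL hm cx cy h e) hc
          have hlen := List.length_filterMap_le
            (fun d => if is_valid_move hm (cx + d.1) (cy + d.2) ch (PySem.Set.add v (cx, cy)) then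
              some (cx + d.1, cy + d.2, (pvGet2 hm (cx + d.1) (cy + d.2)).getD 0) else none)
            ([((-1 : Int), (0 : Int)), (1, 0), (0, -1), (0, 1)])
          rw [ih f' (by omega) _ _ _ (by simp; simp at hlen; omega) ?hH2]
          case hH2 =>
            intro p hp
            rcases List.mem_append.mp hp with hpl | hpr
            · right
              rw [List.mem_reverse] at hpl
              obtain ⟨d, _, hd⟩ := List.mem_filterMap.mp hpl
              split at hd
              case isTrue hvd =>
                obtain ⟨hs, _⟩ := (valid_iff hm _ _ ch _).mp hvd
                have := svalid_get hm _ _ ch hs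
                cases hd
                simp [this]
              case isFalse => cases hd
            · rcases hH _ (List.mem_cons_of_mem _ hpr) with hmem | hsome
              · exact Or.inl (mem_add_of_mem v (cx, cy) _ hmem)
              · exact Or.inr hsome
          rw [goList_append]
          -- it remains to identify runB on the popped cell with the reversed pushes
          have hrun : runB hm (cx, cy, ch) (v, n) =
              goList hm ((([((-1 : Int), (0 : Int)), (1, 0), (0, -1), (0, 1)]).filterMap
                (fun d => if is_valid_move hm (cx + d.1) (cy + d.2) ch (PySem.Set.add v (cx, cy)) then
                  some (cx + d.1, cy + d.2, (pvGet2 hm (cx + d.1) (cy + d.2)).getD 0) else none)).reverse)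
              (PySem.Set.add v (cx, cy), if h == 9 then PySem.Set.add n (cx, cy) else n) := by
            unfold runB
            rw [show 5 * (gridL hm).length + 5 = (5 * (gridL hm).length + 4) + 1 from rfl, rec_succ]
            simp only [hc, Bool.false_eq_true, if_false]
            simp only [e]
            rw [go_spec hm _ _ cx cy ch (PySem.Set.add v (cx, cy)) _ _ (by
                have := pvCount_le hm v
                simp; omega)
              (fun q hq => hq)]
            rw [show ([((0 : Int), (1 : Int)), (0, -1), (1, 0), (-1, 0)]) =
                ([((-1 : Int), (0 : Int)), (1, 0), (0, -1), (0, 1)]).reverse from rfl]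
            rw [List.filterMap_reverse]
          rw [hrun]
      · simp only [if_true]
        rw [runB_visited hm (cx, cy, ch) (v, n) (List.contains_iff_mem.mp hc)]
        exact ih f' (by omega) rest v n (by omega) (fun p hp => hH p (List.mem_cons_of_mem _ hp))

-- ===== VERDICT (by name: the statement is the Claim_ definition above) =====
theorem dfs_count_nines_spec : Claim_equal_dfs_count_nines := by
  intro hm x y v _hdom hpre
  unfold Spec_dfs_count_nines dfs_count_nines dfs_count_nines_alt
  have hH : ∀ p ∈ [((x : Int), (y : Int), (0 : Int))],
      (p.1, p.2.1) ∈ v ∨ (pvGet2 hm p.1 p.2.1).isSome = true := by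
    intro p hp
    simp only [List.mem_singleton] at hp
    subst hp
    rcases hpre with hmem | ⟨hrect, hx, hy⟩
    · exact Or.inl hmem
    · right
      cases e : PySem.List.pyGet? hm x with
      | none => exfalso; rw [PySem.List.pyGet?_eq_none_iff] at e; exact e hx
      | some row =>
        have hrow : row ∈ hm := PySem.List.mem_of_pyGet?_eq_some hm e
        have hy' : PySem.Raise.InRange row.length y := by rw [hrect row hrow]; exact hy
        cases e2 : PySem.List.pyGet? row y with
        | none => exfalso; rw [PySem.List.pyGet?_eq_none_iff] at e2; exact e2 hy'
        | some z => simp [pvGet2, e, e2]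
  rw [loop_spec hm (4 * (gridL hm).length + 1) [(x, y, 0)] v []
    (by have := pvCount_le hm v; simp; omega) hH]
  rw [goList_cons, goList_nil]
  rfl
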